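-- pv_equiv track=rewrite | github.com/Kalliadickal/Academic-Progression-Guide | test/project.py | get_failed_list
-- ===== SOURCE A (Python) =====
-- def get_failed_list(rollmark):
--     # Funcition accepting marks of all students and printing the list of failed
--     # students and returning a list of the failed students
--
--     fail_list=[]
--     absent=[]
--     for i in rollmark:
--         for j in i[1]:
--                 if j<40:
--                     if(j==-1):
--                         if i[0] not in absent:
--                             absent.append(i[0])
--                     else:
--                         if i[0] not in fail_list:
--                             fail_list.append(i[0])
--     for i in fail_list:
--         if i in absent:
--             absent.remove(i)
--
--     return [fail_list,absent]
-- ===== SOURCE B (Python) =====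
-- def get_failed_list(rollmark):
--     # Pass 1: build the failure index (rolls with a real failing mark), deduped.
--     fail_list = []
--     for roll, marks in rollmark:
--         if any(j < 40 and j != -1 for j in marks) and roll not in fail_list:
--             fail_list.append(roll)
--     # Pass 2: absentees filtered against the fully-built fail_list (no removal loop).
--     absent = []
--     for roll, marks in rollmark:
--         if any(j == -1 for j in marks) and roll not in fail_list and roll not in absent:
--             absent.append(roll)
--     return [fail_list, absent]
-- ===== Notes on version B (the rewrite author's own statement) =====
-- stated objective: simpler
-- what changed: Replaces A's single nested pass that interleaves both accumulators plus a trailing add-then-remove clean-up loop with two independent any()-based passes: the failure index is built first, and absentees are filtered against it at append time, so the removal loop disappears.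
import Mathlib
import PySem

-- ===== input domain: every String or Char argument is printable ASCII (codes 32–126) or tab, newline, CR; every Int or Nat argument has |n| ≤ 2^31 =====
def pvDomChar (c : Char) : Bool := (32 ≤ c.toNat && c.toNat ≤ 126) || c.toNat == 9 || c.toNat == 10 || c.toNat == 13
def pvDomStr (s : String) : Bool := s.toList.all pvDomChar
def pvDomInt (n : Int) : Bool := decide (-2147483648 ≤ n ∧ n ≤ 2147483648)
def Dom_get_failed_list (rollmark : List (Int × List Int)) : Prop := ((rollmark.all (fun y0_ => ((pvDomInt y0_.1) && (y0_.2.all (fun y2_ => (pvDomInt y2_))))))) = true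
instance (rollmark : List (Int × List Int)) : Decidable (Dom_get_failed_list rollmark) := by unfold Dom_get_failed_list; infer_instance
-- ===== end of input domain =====

-- B builds the failure index in a first pass and filters absentees against it at append time,
-- replacing A's interleaved nested pass plus add-then-remove clean-up loop (objective: simpler).

-- ===== PORT A =====
def get_failed_list (rollmark : List (Int × List Int)) : List (List Int) :=
  -- nested pass building fail_list and absent together
  let st := rollmark.foldl (fun (st : List Int × List Int) i =>
    i.2.foldl (fun (st : List Int × List Int) j =>
      if j < 40 then
        if j = -1 then
          (if i.1 ∈ st.2 then st else (st.1, st.2 ++ [i.1]))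
        else
          (if i.1 ∈ st.1 then st else (st.1 ++ [i.1], st.2))
      else st) st) ([], [])
  -- for i in fail_list: if i in absent: absent.remove(i)
  let absent := st.1.foldl (fun a i => if i ∈ a then (PySem.List.remove? a i).getD a else a) st.2
  [st.1, absent]

-- ===== PORT B =====
def get_failed_list_alt (rollmark : List (Int × List Int)) : List (List Int) :=
  let fail := rollmark.foldl (fun f i =>
    if (i.2.any fun j => decide (j < 40) && !decide (j = -1)) ∧ i.1 ∉ f then f ++ [i.1] else f) []
  let absent := rollmark.foldl (fun a i =>
    if (i.2.any fun j => decide (j = -1)) ∧ i.1 ∉ fail ∧ i.1 ∉ a then a ++ [i.1] else a) []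
  [fail, absent]

-- ===== PRECONDITION & SPEC =====
def Spec_get_failed_list (rollmark : List (Int × List Int)) (out : List (List Int)) : Prop := out = get_failed_list_alt rollmark
instance (rollmark : List (Int × List Int)) (out : List (List Int)) : Decidable (Spec_get_failed_list rollmark out) := by unfold Spec_get_failed_list; infer_instance

-- ===== CLAIM (what is proved, stated in full; the proofs are below) =====
def Claim_equal_get_failed_list : Prop := ∀ (rollmark : List (Int × List Int)), Dom_get_failed_list rollmark → Spec_get_failed_list rollmark (get_failed_list rollmark)

-- ===== LEMMAS AND PROOFS =====

-- per-mark updates of the two accumulators (A's inner loop, split per component)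
def pvG1 (r : Int) (f : List Int) (j : Int) : List Int :=
  if j < 40 ∧ j ≠ -1 then (if r ∈ f then f else f ++ [r]) else f
def pvG2 (r : Int) (a : List Int) (j : Int) : List Int :=
  if j = -1 then (if r ∈ a then a else a ++ [r]) else a
-- per-row canonical absent step (dedup append when a -1 is present)
def pvStepA (a : List Int) (i : Int × List Int) : List Int :=
  if ((-1 : Int) ∈ i.2) ∧ i.1 ∉ a then a ++ [i.1] else a

lemma pv_foldl_prod {α β ι : Type} (s : α × β → ι → α × β) (s1 : α → ι → α) (s2 : β → ι → β)
    (h : ∀ p i, s p i = (s1 p.1 i, s2 p.2 i)) :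
    ∀ (l : List ι) (p : α × β), l.foldl s p = (l.foldl s1 p.1, l.foldl s2 p.2) := by
  intro l
  induction l with
  | nil => intro p; rfl
  | cons x xs ih => intro p; simp [List.foldl, h, ih]

lemma pv_inner_split (r : Int) (ms : List Int) (f a : List Int) :
    ms.foldl (fun (st : List Int × List Int) j =>
      if j < 40 then
        if j = -1 then
          (if r ∈ st.2 then st else (st.1, st.2 ++ [r]))
        else
          (if r ∈ st.1 then st else (st.1 ++ [r], st.2))
      else st) (f, a) = (ms.foldl (pvG1 r) f, ms.foldl (pvG2 r) a) := by
  apply pv_foldl_prod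
  intro p j
  unfold pvG1 pvG2
  split_ifs <;> simp_all

lemma pv_g1_fold (r : Int) (ms : List Int) (f : List Int) :
    ms.foldl (pvG1 r) f =
      if (ms.any fun j => decide (j < 40) && !decide (j = -1)) ∧ r ∉ f then f ++ [r] else f := by
  induction ms generalizing f with
  | nil => simp
  | cons j ms ih =>
    by_cases hj : j < 40 ∧ j ≠ -1
    · simp only [List.foldl, pvG1, if_pos hj]
      by_cases hr : r ∈ f
      · rw [if_pos hr, ih]
        by_cases hm : (ms.any fun j => decide (j < 40) && !decide (j = -1)) = true <;>
          simp [hm, hr, hj.1, hj.2]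
      · rw [if_neg hr, ih]
        have : r ∈ f ++ [r] := by simp
        simp [this, hj.1, hj.2, hr]
    · simp only [List.foldl, pvG1, if_neg hj]
      rw [ih]
      have : ((decide (j < 40) && !decide (j = -1)) = true) ↔ False := by
        simp; intro h; by_contra hne; exact hj ⟨h, hne⟩
      simp [List.any_cons, this]
  
lemma pv_g2_fold (r : Int) (ms : List Int) (a : List Int) :
    ms.foldl (pvG2 r) a = if ((-1 : Int) ∈ ms) ∧ r ∉ a then a ++ [r] else a := by
  induction ms generalizing a with
  | nil => simp
  | cons j ms ih =>
    by_cases hj : j = -1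
    · subst hj
      simp only [List.foldl, pvG2, if_pos]
      by_cases hr : r ∈ a
      · rw [if_pos hr, ih]
        by_cases hm : (-1 : Int) ∈ ms <;> simp [hm, hr]
      · rw [if_neg hr, ih]
        have : r ∈ a ++ [r] := by simp
        simp [this, hr]
    · simp only [List.foldl, pvG2, if_neg hj]
      rw [ih]
      have hne : ¬(-1 : Int) = j := fun h => hj h.symm
      simp [List.mem_cons, hne]

-- A's outer loop equals the pair of B's fail fold and the canonical absent-raw fold
lemma pv_outer_split (rollmark : List (Int × List Int)) :
    rollmark.foldl (fun (st : List Int × List Int) i =>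
      i.2.foldl (fun (st : List Int × List Int) j =>
        if j < 40 then
          if j = -1 then
            (if i.1 ∈ st.2 then st else (st.1, st.2 ++ [i.1]))
          else
            (if i.1 ∈ st.1 then st else (st.1 ++ [i.1], st.2))
        else st) st) ([], []) =
    (rollmark.foldl (fun f i =>
        if (i.2.any fun j => decide (j < 40) && !decide (j = -1)) ∧ i.1 ∉ f then f ++ [i.1] else f) [],
     rollmark.foldl pvStepA []) := by
  apply pv_foldl_prod
  intro p i
  rw [show p = (p.1, p.2) from rfl, pv_inner_split, pv_g1_fold, pv_g2_fold]
  rfl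

lemma pv_stepA_nodup (l : List (Int × List Int)) (a : List Int) (h : a.Nodup) :
    (l.foldl pvStepA a).Nodup := by
  induction l generalizing a with
  | nil => exact h
  | cons i l ih =>
    apply ih
    unfold pvStepA
    split_ifs with h1
    · refine List.Nodup.append h (List.nodup_singleton _) ?_
      intro x hx hx1
      simp only [List.mem_singleton] at hx1
      subst hx1
      exact h1.2 hx
    · exact h

-- the removal loop on a duplicate-free list is a filter
lemma pv_removal_filter (fail : List Int) (a : List Int) (h : a.Nodup) :
    fail.foldl (fun a i => if i ∈ a then (PySem.List.remove? a i).getD a else a) a =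
      a.filter (fun x => decide (x ∉ fail)) := by
  induction fail generalizing a with
  | nil => simp
  | cons i fail ih =>
    have hstep : (if i ∈ a then (PySem.List.remove? a i).getD a else a) = a.filter (fun x => decide (x ≠ i)) := by
      by_cases hi : i ∈ a
      · rw [if_pos hi, PySem.List.remove?_eq_some_erase _ _ hi]
        simp only [Option.getD_some, h.erase_eq_filter]
        apply List.filter_congr
        intro x _
        by_cases hxi : x = i <;> simp [hxi]
      · rw [if_neg hi, Eq.comm, List.filter_eq_self]
        intro x hx
        simp only [decide_eq_true_eq]
        rintro rfl; exact hi hx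
    simp only [List.foldl, hstep]
    rw [ih _ (h.filter _), List.filter_filter]
    apply List.filter_congr
    intro x _
    simp only [List.mem_cons]
    by_cases h1 : x = i <;> by_cases h2 : x ∈ fail <;> simp [h1, h2]

-- B's absent pass computes the filtered canonical absent-raw fold
lemma pv_absent_rel (fail : List Int) (l : List (Int × List Int)) (a : List Int) :
    l.foldl (fun a i =>
        if (i.2.any fun j => decide (j = -1)) ∧ i.1 ∉ fail ∧ i.1 ∉ a then a ++ [i.1] else a)
      (a.filter (fun x => decide (x ∉ fail))) =
    (l.foldl pvStepA a).filter (fun x => decide (x ∉ fail)) := by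
  induction l generalizing a with
  | nil => rfl
  | cons i l ih =>
    have hstep :
        (if (i.2.any fun j => decide (j = -1)) ∧ i.1 ∉ fail ∧ i.1 ∉ a.filter (fun x => decide (x ∉ fail))
          then a.filter (fun x => decide (x ∉ fail)) ++ [i.1] else a.filter (fun x => decide (x ∉ fail))) =
        (pvStepA a i).filter (fun x => decide (x ∉ fail)) := by
      unfold pvStepA
      have hany : ((i.2.any fun j => decide (j = -1)) = true) ↔ (-1 : Int) ∈ i.2 := by
        constructor
        · intro hx
          rcases List.any_eq_true.mp hx with ⟨j, hj, hd⟩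
          rw [decide_eq_true_eq] at hd
          exact hd ▸ hj
        · intro hx
          exact List.any_eq_true.mpr ⟨-1, hx, by simp⟩
      by_cases hm : (-1 : Int) ∈ i.2
      · by_cases hf : i.1 ∈ fail
        · by_cases ha : i.1 ∈ a
          · simp [hany, hm, hf, ha, List.mem_filter]
          · simp [hany, hm, hf, ha, List.filter_append]
        · by_cases ha : i.1 ∈ a
          · simp [hany, hm, hf, ha]
          · simp [hany, hm, hf, ha, List.filter_append]
      · simp [hany, hm]
    simp only [List.foldl, hstep]
    exact ih (pvStepA a i)

-- ===== VERDICT (by name: the statement is the Claim_ definition above) =====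
theorem get_failed_list_spec : Claim_equal_get_failed_list := by
  intro rollmark _
  unfold Spec_get_failed_list get_failed_list get_failed_list_alt
  rw [pv_outer_split]
  simp only
  rw [pv_removal_filter _ _ (pv_stepA_nodup rollmark [] List.nodup_nil),
      ← pv_absent_rel _ rollmark []]
  rfl
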